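-- pv_equiv track=rewrite | github.com/cuongvu12a/CTDL_GT | contest/8. Hàng đợi/8.13.py | solve
-- ===== SOURCE A (Python) =====
-- from collections import deque
--
-- def solve(l, r):
--     queue = deque([1,2,3,4,5])
--     count = 0
--     while queue:
--         curr = queue.popleft()
--         if l <= curr <= r:
--             count += 1
--
--         if curr * 10 > r:
--             continue
--
--         curr_str = str(curr)
--         for next in range(6):
--             next_str = str(next)
--             if next_str not in curr_str:
--                 new_num = curr * 10 + next
--                 if int(new_num) <= r:
--                     queue.append(new_num)
--     return count
-- ===== SOURCE B (Python) =====
-- def solve(l, r):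
--     # Flat generate-and-filter: enumerate k-permutations of the digits 0..5
--     # for k = 1..6, skip those with a leading zero, build the value and
--     # count it when it lies in [l, r].
--     def perms(items, k):
--         if k == 0:
--             return [[]]
--         return [[x] + rest
--                 for i, x in enumerate(items)
--                 for rest in perms(items[:i] + items[i + 1:], k - 1)]
--
--     count = 0
--     for k in range(1, 7):
--         for p in perms([0, 1, 2, 3, 4, 5], k):
--             if p[0] == 0:
--                 continue
--             v = 0
--             for d in p:
--                 v = v * 10 + d
--             if l <= v <= r:
--                 count += 1
--     return count
-- ===== Notes on version B (the rewrite author's own statement) =====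
-- stated objective: alternative
-- what changed: Replaces the deque BFS with incremental <=r pruning by a flat generate-and-filter: hand-rolled k-permutations of the digits 0..5 for k=1..6, skipping leading zeros, counting the built values that land in [l,r].
import Mathlib
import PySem

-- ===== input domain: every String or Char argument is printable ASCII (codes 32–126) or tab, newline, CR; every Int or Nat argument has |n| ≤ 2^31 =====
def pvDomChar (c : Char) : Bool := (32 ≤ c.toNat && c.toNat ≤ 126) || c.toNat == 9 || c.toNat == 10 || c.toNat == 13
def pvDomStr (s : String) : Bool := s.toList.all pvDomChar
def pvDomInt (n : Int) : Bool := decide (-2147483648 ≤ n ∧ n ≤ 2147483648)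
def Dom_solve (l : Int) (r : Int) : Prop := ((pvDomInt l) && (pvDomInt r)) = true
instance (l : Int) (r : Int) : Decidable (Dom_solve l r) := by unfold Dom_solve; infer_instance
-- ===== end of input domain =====

-- B replaces A's deque BFS (with incremental ≤ r pruning) by a flat generate-and-filter
-- over hand-rolled k-permutations of the digits 0..5; objective: alternative (same cost class).

-- ===== PORT A =====
-- A's while-loop over the deque, as recursion on the queue with a constant fuel guard; the
-- fuel never runs out: the BFS pops at most 1630 nodes (the invariant `loop_inv` below is
-- applied with the generic bound `totalLenN_init_le`, so the guard is never the limit).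
def solveLoop (l : Int) (r : Int) : Nat → List Int → Int → Int
  | 0, _, count => count
  | _ + 1, [], count => count
  | fuel + 1, curr :: queue, count =>
    let count' := if l ≤ curr ∧ curr ≤ r then count + 1 else count
    if curr * 10 > r then
      solveLoop l r fuel queue count'
    else
      let curr_str := PySem.Int.toStr curr
      let queue' := (PySem.List.pyRange 0 6 1).foldl (fun q next =>
        if PySem.Str.isIn (PySem.Int.toStr next) curr_str = false then
          if curr * 10 + next ≤ r then q ++ [curr * 10 + next] else q
        else q) queue
      solveLoop l r fuel queue' count'

def solve (l : Int) (r : Int) : Int := solveLoop l r 1000000 [1, 2, 3, 4, 5] 0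

-- ===== PORT B =====
-- Source B's perms(items, k): k-permutations as a comprehension, recursion on k
-- (Python's k is a count ≥ 0; Nat here).
def permsB : Nat → List Int → List (List Int)
  | 0, _ => [[]]
  | k + 1, items =>
    (PySem.List.enumerate items 0).flatMap (fun ix =>
      (permsB k (PySem.List.slice items none (some ix.1) ++
                 PySem.List.slice items (some (ix.1 + 1)) none)).map
        (fun rest => ix.2 :: rest))

def solve_alt (l : Int) (r : Int) : Int :=
  (PySem.List.pyRange 1 7 1).foldl (fun count k =>
    (permsB k.toNat [0, 1, 2, 3, 4, 5]).foldl (fun count p =>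
      if PySem.List.pyGetD p 0 0 = 0 then count
      else
        let v := p.foldl (fun v d => v * 10 + d) 0
        if l ≤ v ∧ v ≤ r then count + 1 else count) count) 0

-- ===== PRECONDITION & SPEC =====
def Spec_solve (l : Int) (r : Int) (out : Int) : Prop := out = solve_alt l r
instance (l : Int) (r : Int) (out : Int) : Decidable (Spec_solve l r out) := by unfold Spec_solve; infer_instance

-- ===== CLAIM (what is proved, stated in full; the proofs are below) =====
def Claim_equal_solve : Prop := ∀ (l : Int) (r : Int), Dom_solve l r → Spec_solve l r (solve l r)

-- ===== LEMMAS AND PROOFS =====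

-- the counted predicate
def Pb (l r x : Int) : Bool := decide (l ≤ x ∧ x ≤ r)

-- numeric twin of A's per-node string test: does the decimal representation of v contain d?
def hasD : Nat → Int → Int → Bool
  | 0, _, _ => false
  | f + 1, v, d => if v ≤ 0 then false else (v % 10 == d) || hasD f (v / 10) d

def numFilt (v : Int) : List Int :=
  ([0, 1, 2, 3, 4, 5] : List Int).filter (fun d => !hasD 7 v d)

def childrenN (v : Int) : List Int := (numFilt v).map (fun d => v * 10 + d)

-- unpruned descendant list (the node, then descendants of each child), fuel = remaining levels
def descN : Nat → Int → List Int
  | 0, _ => []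
  | f + 1, v => v :: (childrenN v).flatMap (descN f)

-- per-node invariant: the pair fuel is the number of still-missing digits, the value is
-- positive with distinct decimal digits, all below 6
def OKn (f : Nat) (v : Int) : Prop :=
  f = (numFilt v).length ∧ 1 ≤ v ∧ (Nat.digits 10 v.toNat).Nodup ∧
    ∀ e ∈ Nat.digits 10 v.toNat, e < 6

def totalLenN (pq : List (Nat × Int)) : Nat :=
  (pq.map (fun p => (descN (p.1 + 1) p.2).length)).sum

def pqInit : List (Nat × Int) := [(5, 1), (5, 2), (5, 3), (5, 4), (5, 5)]

def candN : List Int := pqInit.flatMap (fun p => descN (p.1 + 1) p.2)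

-- B's value of a digit tuple, and the values B inspects at length k
def valB (p : List Int) : Int := p.foldl (fun v d => v * 10 + d) 0

def lvlB (k : Nat) : List Int :=
  ((permsB k [0, 1, 2, 3, 4, 5]).filter
    (fun p => !decide (PySem.List.pyGetD p 0 0 = 0))).map valB

def candB : List Int := lvlB 1 ++ lvlB 2 ++ lvlB 3 ++ lvlB 4 ++ lvlB 5 ++ lvlB 6

-- fuel-bounded structural merge sort (kernel-reducible, used to compare candN and candB)
def mergeF : Nat → List Int → List Int → List Int
  | 0, xs, ys => xs ++ ys
  | f + 1, xs, ys =>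
    match xs, ys with
    | [], ys => ys
    | xs, [] => xs
    | x :: xs, y :: ys =>
      if x ≤ y then x :: mergeF f xs (y :: ys) else y :: mergeF f (x :: xs) ys

def pairUp : List (List Int) → List (List Int)
  | [] => []
  | [a] => [a]
  | a :: b :: rest => mergeF 4000 a b :: pairUp rest

def msortRounds : Nat → List (List Int) → List Int
  | 0, ls => ls.flatten
  | f + 1, ls => if ls.length ≤ 1 then ls.flatten else msortRounds f (pairUp ls)

def msort (l : List Int) : List Int := msortRounds 20 (l.map (fun x => [x]))

-- ---- the string digit test equals the numeric digit test (for 1 ≤ v < 10^7) ----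

lemma toDigitsCore_eq_digits (f : Nat) : ∀ (n : Nat) (acc : List Char), 1 ≤ n → n < 10 ^ f →
    Nat.toDigitsCore 10 f n acc = ((Nat.digits 10 n).reverse.map Nat.digitChar) ++ acc := by
  induction f with
  | zero => intro n acc h1 h2; omega
  | succ f ih =>
    intro n acc h1 h2
    simp only [Nat.toDigitsCore]
    by_cases h : n / 10 = 0
    · have hn : n < 10 := by omega
      rw [Nat.digits_def' (by norm_num) (by omega), Nat.mod_eq_of_lt hn, h]
      simp
    · have hlt : n / 10 < 10 ^ f := by
        have hk : 10 ^ (f + 1) = 10 ^ f * 10 := pow_succ 10 f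
        omega
      rw [if_neg h, ih (n / 10) _ (by omega) hlt]
      rw [Nat.digits_def' (b := 10) (n := n) (by norm_num) (by omega)]
      simp

lemma toChars_pos {v : Int} (hv : 1 ≤ v) :
    PySem.Int.toChars v = ((Nat.digits 10 v.toNat).reverse.map Nat.digitChar) := by
  rw [PySem.Int.toChars, if_neg (by omega), Nat.toDigits]
  rw [toDigitsCore_eq_digits _ _ _ (by omega)
      (lt_of_lt_of_le (Nat.lt_pow_self (by norm_num)) (Nat.pow_le_pow_right (by norm_num) (by omega)))]
  simp

lemma hasD_zero (f : Nat) (d : Int) : hasD f 0 d = false := by cases f <;> simp [hasD]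

lemma hasD_iff (f : Nat) : ∀ (n : Nat), 0 < n → n < 10 ^ f → ∀ (d : Nat),
    (hasD f (n : Int) (d : Int) = true ↔ d ∈ Nat.digits 10 n) := by
  induction f with
  | zero => intro n h1 h2; omega
  | succ f ih =>
    intro n h1 h2 d
    rw [Nat.digits_def' (by norm_num : (1:Nat) < 10) h1]
    simp only [hasD, if_neg (by omega : ¬ (n : Int) ≤ 0)]
    have hmod : (n : Int) % 10 = ((n % 10 : Nat) : Int) := by push_cast; ring
    have hdiv : (n : Int) / 10 = ((n / 10 : Nat) : Int) := by omega
    by_cases h : n / 10 = 0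
    · rw [hmod, hdiv, h]
      simp [hasD_zero, beq_iff_eq]
      omega
    · have hlt : n / 10 < 10 ^ f := by
        have hk : 10 ^ (f + 1) = 10 ^ f * 10 := pow_succ 10 f
        omega
      rw [hmod, hdiv]
      simp only [Bool.or_eq_true, beq_iff_eq, ih (n / 10) (by omega) hlt d, List.mem_cons,
        Nat.cast_inj]
      tauto

lemma digitChar_inj {x y : Nat} (hx : x < 10) (hy : y < 10) :
    Nat.digitChar x = Nat.digitChar y → x = y := by
  interval_cases x <;> interval_cases y <;> simp_all <;> decide

lemma str_test_eq_hasD {v d : Int} (h1 : 1 ≤ v) (h2 : v < 10000000) (hdl : 0 ≤ d)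
    (hdu : d < 6) :
    decide (PySem.Str.isIn (PySem.Int.toStr d) (PySem.Int.toStr v) = false) = !hasD 7 v d := by
  have htd : PySem.Int.toChars d = [Nat.digitChar d.toNat] := by
    interval_cases d <;> decide
  have hvlt : v.toNat < 10 ^ 7 := by omega
  have hinf : (PySem.Int.toChars d <:+: PySem.Int.toChars v) ↔ d.toNat ∈ Nat.digits 10 v.toNat := by
    rw [htd, toChars_pos h1, List.singleton_infix_iff, List.mem_map]
    constructor
    · rintro ⟨x, hx, hxe⟩
      have hx10 : x < 10 := Nat.digits_lt_base (by norm_num) (List.mem_reverse.1 hx)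
      have := digitChar_inj hx10 (by omega) hxe
      subst this
      exact List.mem_reverse.1 hx
    · intro hm
      exact ⟨d.toNat, List.mem_reverse.2 hm, rfl⟩
  have hhas := hasD_iff 7 v.toNat (by omega) hvlt d.toNat
  rw [show ((v.toNat : Nat) : Int) = v by omega, show ((d.toNat : Nat) : Int) = d by omega] at hhas
  rw [← hhas] at hinf
  simp only [pysem]
  cases hh : hasD 7 v d
  · simp only [Bool.not_false, decide_eq_true_eq]
    rw [Bool.eq_false_iff] at hh
    intro hc
    exact hh (hinf.1 hc)
  · simp only [Bool.not_true, decide_eq_false_iff_not, not_not]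
    exact hinf.2 hh

lemma strFilt_eq_numFilt {v : Int} (h1 : 1 ≤ v) (h2 : v < 10000000) :
    (PySem.List.pyRange 0 6 1).filter
        (fun d => decide (PySem.Str.isIn (PySem.Int.toStr d) (PySem.Int.toStr v) = false))
      = numFilt v := by
  rw [show PySem.List.pyRange 0 6 1 = ([0, 1, 2, 3, 4, 5] : List Int) from by decide]
  apply List.filter_congr
  intro d hd
  have hdb : 0 ≤ d ∧ d < 6 := by
    simp only [List.mem_cons, List.not_mem_nil, or_false] at hd
    rcases hd with rfl | rfl | rfl | rfl | rfl | rfl <;> norm_num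
  exact str_test_eq_hasD h1 h2 hdb.1 hdb.2

-- ---- facts about OKn nodes and their children ----

lemma mem_numFilt {v d : Int} (hd : d ∈ numFilt v) :
    (0 ≤ d ∧ d < 6) ∧ hasD 7 v d = false := by
  rcases List.mem_filter.1 hd with ⟨hmem, hf⟩
  refine ⟨?_, by simpa using hf⟩
  simp only [List.mem_cons, List.not_mem_nil, or_false] at hmem
  rcases hmem with rfl | rfl | rfl | rfl | rfl | rfl <;> norm_num

lemma mem_childrenN {v w : Int} (hw : w ∈ childrenN v) :
    ∃ d, d ∈ numFilt v ∧ w = v * 10 + d := by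
  rcases List.mem_map.1 hw with ⟨d, hd, rfl⟩
  exact ⟨d, hd, rfl⟩

lemma small_of_digits {v : Int} (h1 : 1 ≤ v) (hn : (Nat.digits 10 v.toNat).Nodup)
    (hlt : ∀ e ∈ Nat.digits 10 v.toNat, e < 6) : v < 1000000 := by
  have hsub : (Nat.digits 10 v.toNat).toFinset ⊆ Finset.range 6 := by
    intro e he
    rw [Finset.mem_range]
    exact hlt e (List.mem_toFinset.1 he)
  have hcard := Finset.card_le_card hsub
  rw [List.toFinset_card_of_nodup hn, Finset.card_range] at hcard
  have h6 : v.toNat < 10 ^ 6 := (Nat.digits_length_le_iff (by norm_num) v.toNat).1 hcard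
  norm_num at h6
  omega

lemma digits_child {v d : Int} (hv : 1 ≤ v) (hd0 : 0 ≤ d) (hd : d < 10) :
    Nat.digits 10 (v * 10 + d).toNat = d.toNat :: Nat.digits 10 v.toNat := by
  have h1 : (v * 10 + d).toNat = 10 * v.toNat + d.toNat := by omega
  rw [h1, Nat.digits_def' (by norm_num : (1:Nat) < 10) (by omega)]
  have h2 : (10 * v.toNat + d.toNat) % 10 = d.toNat := by omega
  have h3 : (10 * v.toNat + d.toNat) / 10 = v.toNat := by omega
  rw [h2, h3]

lemma hasD_child {v d e : Int} (hv : 1 ≤ v) (hv6 : v < 1000000) (hd0 : 0 ≤ d) (hd : d < 10)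
    (he0 : 0 ≤ e) (he : e < 10) :
    hasD 7 (v * 10 + d) e = ((e == d) || hasD 7 v e) := by
  have h₁ := hasD_iff 7 (v * 10 + d).toNat (by omega) (by omega) e.toNat
  have h₂ := hasD_iff 7 v.toNat (by omega) (by omega) e.toNat
  rw [show (((v * 10 + d).toNat : Nat) : Int) = v * 10 + d by omega,
      show ((e.toNat : Nat) : Int) = e by omega] at h₁
  rw [show ((v.toNat : Nat) : Int) = v by omega,
      show ((e.toNat : Nat) : Int) = e by omega] at h₂
  rw [digits_child hv hd0 hd] at h₁
  rw [Bool.eq_iff_iff]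
  simp only [Bool.or_eq_true, beq_iff_eq, h₁, h₂, List.mem_cons]
  constructor
  · rintro (h | h)
    · left; omega
    · right; exact h
  · rintro (h | h)
    · left; omega
    · right; exact h

lemma numFilt_nodup (v : Int) : (numFilt v).Nodup :=
  List.Nodup.filter _ (by decide)

lemma numFilt_child {v d : Int} (hv : 1 ≤ v) (hv6 : v < 1000000) (hd : d ∈ numFilt v) :
    numFilt (v * 10 + d) = (numFilt v).filter (fun e => !(e == d)) := by
  obtain ⟨⟨hd0, hdu⟩, _⟩ := mem_numFilt hd
  rw [numFilt, numFilt, List.filter_filter]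
  apply List.filter_congr
  intro e he
  have heb : 0 ≤ e ∧ e < 6 := by
    simp only [List.mem_cons, List.not_mem_nil, or_false] at he
    rcases he with rfl | rfl | rfl | rfl | rfl | rfl <;> norm_num
  rw [hasD_child hv hv6 hd0 (by omega) heb.1 (by omega)]
  cases hasD 7 v e <;> cases hee : (e == d) <;> simp

lemma length_filter_ne {d : Int} : ∀ (l : List Int), l.Nodup → d ∈ l →
    (l.filter (fun e => !(e == d))).length = l.length - 1 := by
  intro l
  induction l with
  | nil => intro _ h; simp at h
  | cons b l ih =>
    intro hnd hm
    rcases List.mem_cons.1 hm with heq | hm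
    · subst heq
      have hne : l.filter (fun e => !(e == d)) = l := by
        apply List.filter_eq_self.2
        intro x hx
        have hxd : x ≠ d := by
          intro hxe
          exact (List.nodup_cons.1 hnd).1 (hxe ▸ hx)
        simp [hxd]
      simp [List.filter_cons, hne]
    · have hbd : b ≠ d := by
        intro hbe
        exact (List.nodup_cons.1 hnd).1 (hbe ▸ hm)
      have hlen : 1 ≤ l.length := List.length_pos_of_mem hm
      simp only [List.filter_cons, show (!(b == d)) = true by simp [hbd], if_pos]
      simp only [List.length_cons, ih (List.nodup_cons.1 hnd).2 hm]
      omega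

lemma OKn_child {f : Nat} {v d : Int} (h : OKn (f + 1) v) (hd : d ∈ numFilt v) :
    OKn f (v * 10 + d) := by
  obtain ⟨hf, hv, hnd, hlt⟩ := h
  obtain ⟨⟨hd0, hdu⟩, hhd⟩ := mem_numFilt hd
  have hv6 : v < 1000000 := small_of_digits hv hnd hlt
  have hdig := digits_child hv hd0 (by omega)
  have hdm : d.toNat ∉ Nat.digits 10 v.toNat := by
    intro hc
    have h₂ := hasD_iff 7 v.toNat (by omega) (by omega) d.toNat
    rw [show ((v.toNat : Nat) : Int) = v by omega,
        show ((d.toNat : Nat) : Int) = d by omega] at h₂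
    rw [h₂.2 hc] at hhd
    simp at hhd
  refine ⟨?_, by omega, ?_, ?_⟩
  · rw [numFilt_child hv hv6 hd, length_filter_ne _ (numFilt_nodup v) hd]
    omega
  · rw [hdig]
    exact List.nodup_cons.2 ⟨hdm, hnd⟩
  · rw [hdig]
    intro e he
    rcases List.mem_cons.1 he with rfl | he
    · omega
    · exact hlt e he

lemma childrenN_nil_of_zero {v : Int} (h : OKn 0 v) : childrenN v = [] := by
  have : numFilt v = [] := List.length_eq_zero_iff.1 h.1.symm
  rw [childrenN, this, List.map_nil]

-- ---- generic small lemmas ----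

lemma desc_ge {f : Nat} {v x : Int} (hv : 1 ≤ v) (hx : x ∈ descN f v) : v ≤ x := by
  induction f generalizing v with
  | zero => simp [descN] at hx
  | succ f ih =>
    simp only [descN, List.mem_cons, List.mem_flatMap] at hx
    rcases hx with rfl | ⟨w, hw, hx⟩
    · omega
    · rcases mem_childrenN hw with ⟨d, hd, rfl⟩
      obtain ⟨⟨hd0, _⟩, _⟩ := mem_numFilt hd
      have := ih (v := v * 10 + d) (by omega) hx
      omega

lemma countP_desc_zero {l r : Int} {f : Nat} {v : Int} (hv : 1 ≤ v) (hr : r < v) :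
    (descN f v).countP (Pb l r) = 0 := by
  rw [List.countP_eq_zero]
  intro x hx
  have := desc_ge hv hx
  simp only [Pb, decide_eq_true_eq]
  omega

lemma countP_filter_le {l r : Int} {f : Nat} (ws : List Int) (h1 : ∀ w ∈ ws, 1 ≤ w) :
    ((ws.filter (fun w => decide (w ≤ r))).flatMap (descN f)).countP (Pb l r)
      = (ws.flatMap (descN f)).countP (Pb l r) := by
  induction ws with
  | nil => rfl
  | cons w ws ih =>
    have hw : (1:Int) ≤ w := h1 w (by simp)
    have ih' := ih (fun x hx => h1 x (by simp [hx]))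
    by_cases hle : w ≤ r
    · simp [List.filter_cons, hle, List.countP_append, ih']
    · simp [List.filter_cons, hle, List.countP_append, ih',
        countP_desc_zero (l := l) (r := r) (f := f) hw (by omega)]

-- the port's inner foldl collects exactly the doubly-filtered appended elements
lemma foldl_two_if {α β : Type} (A B : β → Prop) [DecidablePred A] [DecidablePred B]
    (f : β → α) : ∀ (lst : List β) (acc : List α),
    lst.foldl (fun q next => if A next then (if B next then q ++ [f next] else q) else q) acc
      = acc ++ (((lst.filter (fun x => decide (A x))).filter (fun x => decide (B x))).map f) := by
  intro lst
  induction lst with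
  | nil => simp
  | cons x xs ih =>
    intro acc
    by_cases hA : A x
    · by_cases hB : B x
      · simp [List.filter_cons, hA, hB, ih]
      · simp [List.filter_cons, hA, hB, ih]
    · simp [List.filter_cons, hA, ih]

lemma countP_flatMap_zero {l r : Int} (g : Int → List Int) (ws : List Int)
    (h : ∀ w ∈ ws, (g w).countP (Pb l r) = 0) :
    (ws.flatMap g).countP (Pb l r) = 0 := by
  induction ws with
  | nil => rfl
  | cons w ws ih =>
    simp [List.countP_append, h w (by simp), ih (fun x hx => h x (by simp [hx]))]

lemma sum_map_filter_le (g : Int → Nat) (p : Int → Bool) (ds : List Int) :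
    (((ds.filter p).map g).sum : Nat) ≤ ((ds.map g).sum : Nat) := by
  induction ds with
  | nil => simp
  | cons d ds ih =>
    by_cases h : p d
    · simp [List.filter_cons, h]; omega
    · simp [List.filter_cons, h]; omega

-- ---- the BFS invariant ----

lemma loop_inv (l r : Int) : ∀ (fuel : Nat) (pq : List (Nat × Int)) (count : Int),
    (∀ p ∈ pq, OKn p.1 p.2) → totalLenN pq ≤ fuel →
    solveLoop l r fuel (pq.map Prod.snd) count
      = count + ((pq.flatMap (fun p => descN (p.1 + 1) p.2)).countP (Pb l r) : Int) := by
  intro fuel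
  induction fuel with
  | zero =>
    intro pq count hOK hlen
    cases pq with
    | nil => simp [solveLoop]
    | cons p rest => simp [totalLenN, descN] at hlen
  | succ fuel ih =>
    intro pq count hOK hlen
    cases pq with
    | nil => simp [solveLoop]
    | cons p rest =>
      obtain ⟨f, v⟩ := p
      have hOKv : OKn f v := hOK (f, v) List.mem_cons_self
      have hOKrest : ∀ q ∈ rest, OKn q.1 q.2 := fun q hq => hOK q (List.mem_cons_of_mem _ hq)
      have hv1 : 1 ≤ v := hOKv.2.1
      have hv6 : v < 1000000 := small_of_digits hv1 hOKv.2.2.1 hOKv.2.2.2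
      have hch1 : ∀ w ∈ childrenN v, 1 ≤ w := by
        intro w hw
        rcases mem_childrenN hw with ⟨d, hd, rfl⟩
        obtain ⟨⟨hd0, _⟩, _⟩ := mem_numFilt hd
        omega
      have hlen' : totalLenN ((f, v) :: rest) = (descN (f + 1) v).length + totalLenN rest := by
        simp [totalLenN]
      have hc' : (if l ≤ v ∧ v ≤ r then count + 1 else count)
          = count + (if Pb l r v then (1:Int) else 0) := by
        by_cases h : l ≤ v ∧ v ≤ r <;> simp [Pb, h]
      simp only [List.map_cons, solveLoop]
      rw [hc']
      by_cases hpr : v * 10 > r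
      · rw [if_pos hpr]
        rw [ih rest _ hOKrest (by simp [descN] at hlen'; omega)]
        have hz : ((childrenN v).flatMap (descN f)).countP (Pb l r) = 0 := by
          apply countP_flatMap_zero
          intro w hw
          rcases mem_childrenN hw with ⟨d, hd, rfl⟩
          obtain ⟨⟨hd0, _⟩, _⟩ := mem_numFilt hd
          exact countP_desc_zero (by omega) (by omega)
        simp only [List.flatMap_cons, List.countP_append, descN, List.countP_cons, hz]
        push_cast
        ring
      · rw [if_neg hpr]
        rw [foldl_two_if (fun next => PySem.Str.isIn (PySem.Int.toStr next) (PySem.Int.toStr v) = false)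
              (fun next => v * 10 + next ≤ r) (fun next => v * 10 + next) _ _]
        rw [strFilt_eq_numFilt hv1 (by omega)]
        have hmapfil : ((numFilt v).filter (fun x => decide (v * 10 + x ≤ r))).map
              (fun next => v * 10 + next)
            = (childrenN v).filter (fun w => decide (w ≤ r)) := by
          rw [childrenN, List.filter_map]
          rfl
        cases f with
        | zero =>
          have hce : childrenN v = [] := childrenN_nil_of_zero hOKv
          have hne : (numFilt v) = [] := by
            have := hce
            rwa [childrenN, List.map_eq_nil_iff] at this
          rw [hne]
          simp only [List.filter_nil, List.map_nil, List.append_nil]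
          rw [ih rest _ hOKrest (by simp [descN, hce] at hlen' ⊢; omega)]
          simp only [List.flatMap_cons, List.countP_append, descN, List.countP_cons, hce,
            List.flatMap_nil, List.countP_nil]
          push_cast
          ring
        | succ g =>
          have hch : ∀ w ∈ childrenN v, OKn g w := by
            intro w hw
            rcases mem_childrenN hw with ⟨d, hd, rfl⟩
            exact OKn_child hOKv hd
          set ds := (numFilt v).filter (fun x => decide (v * 10 + x ≤ r)) with hds
          have hpq' : rest.map Prod.snd ++ ds.map (fun next => v * 10 + next)
              = (rest ++ ds.map (fun d => (g, v * 10 + d))).map Prod.snd := by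
            simp [List.map_map, Function.comp_def]
          rw [hmapfil] at hpq' ⊢
          rw [hpq']
          have hOK' : ∀ q ∈ rest ++ ds.map (fun d => (g, v * 10 + d)), OKn q.1 q.2 := by
            intro q hq
            rcases List.mem_append.1 hq with hq | hq
            · exact hOKrest q hq
            · rcases List.mem_map.1 hq with ⟨d, hd, rfl⟩
              exact OKn_child hOKv (List.mem_of_mem_filter hd)
          have hflat : (ds.map (fun d => (g, v * 10 + d))).flatMap
                (fun p => descN (p.1 + 1) p.2)
              = ((childrenN v).filter (fun w => decide (w ≤ r))).flatMap (descN (g + 1)) := by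
            rw [← hmapfil, List.flatMap_map, List.flatMap_map]
          have hlensum : totalLenN (rest ++ ds.map (fun d => (g, v * 10 + d))) ≤ fuel := by
            have h1 : totalLenN (rest ++ ds.map (fun d => (g, v * 10 + d)))
                = totalLenN rest
                  + ((ds.map (fun d => v * 10 + d)).map (fun w => (descN (g + 1) w).length)).sum := by
              simp [totalLenN, List.map_map, Function.comp_def]
            have h2 : (descN (g + 1 + 1) v).length
                = 1 + (((numFilt v).map (fun d => v * 10 + d)).map
                    (fun w => (descN (g + 1) w).length)).sum := by
              simp [descN, List.length_flatMap, childrenN, List.map_map, Function.comp_def]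
              omega
            have h3 : ((ds.map (fun d => v * 10 + d)).map (fun w => (descN (g + 1) w).length)).sum
                ≤ (((numFilt v).map (fun d => v * 10 + d)).map
                    (fun w => (descN (g + 1) w).length)).sum := by
              rw [hds]
              simpa [List.map_map, Function.comp_def] using
                sum_map_filter_le (fun d => (descN (g + 1) (v * 10 + d)).length)
                  (fun x => decide (v * 10 + x ≤ r)) (numFilt v)
            omega
          rw [ih _ _ hOK' hlensum]
          simp only [List.flatMap_append, List.countP_append, hflat]
          rw [countP_filter_le _ hch1]
          simp only [List.flatMap_cons, List.countP_append, descN, List.countP_cons]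
          by_cases hPv : Pb l r v <;> simp [hPv] <;> push_cast <;> ring

-- ---- the fuel guard is generous: |descN f v| ≤ 7 ^ f ----

lemma childrenN_len_le (v : Int) : (childrenN v).length ≤ 6 := by
  rw [childrenN, List.length_map]
  calc (numFilt v).length ≤ ([0, 1, 2, 3, 4, 5] : List Int).length := List.length_filter_le _ _
    _ = 6 := rfl

lemma descN_len_le : ∀ (f : Nat) (v : Int), (descN f v).length ≤ 7 ^ f := by
  intro f
  induction f with
  | zero => intro v; simp [descN]
  | succ f ih =>
    intro v
    have hsum : ((childrenN v).map (fun w => (descN f w).length)).sum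
        ≤ ((childrenN v).map (fun w => (descN f w).length)).length * 7 ^ f := by
      have := List.sum_le_card_nsmul ((childrenN v).map (fun w => (descN f w).length)) (7 ^ f)
        (by
          intro x hx
          rcases List.mem_map.1 hx with ⟨w, _, rfl⟩
          exact ih w)
      simpa [smul_eq_mul] using this
    have hlen : ((childrenN v).map (fun w => (descN f w).length)).length ≤ 6 := by
      rw [List.length_map]; exact childrenN_len_le v
    have hpow : 1 ≤ 7 ^ f := Nat.one_le_pow _ _ (by norm_num)
    have h7 : (7:Nat) ^ (f + 1) = 7 * 7 ^ f := pow_succ' 7 f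
    simp only [descN, List.length_cons, List.length_flatMap]
    have : ((childrenN v).map (fun w => (descN f w).length)).sum ≤ 6 * 7 ^ f := by
      calc _ ≤ _ := hsum
        _ ≤ 6 * 7 ^ f := by exact Nat.mul_le_mul_right _ hlen
    omega

lemma totalLenN_init_le : totalLenN pqInit ≤ 1000000 := by
  have h1 := descN_len_le (5 + 1) 1
  have h2 := descN_len_le (5 + 1) 2
  have h3 := descN_len_le (5 + 1) 3
  have h4 := descN_len_le (5 + 1) 4
  have h5 := descN_len_le (5 + 1) 5
  have h7 : (7:Nat) ^ 6 = 117649 := by norm_num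
  rw [h7] at h1 h2 h3 h4 h5
  simp only [totalLenN, pqInit, List.map_cons, List.map_nil, List.sum_cons, List.sum_nil]
  omega

lemma pqInit_ok : ∀ p ∈ pqInit, OKn p.1 p.2 := by
  intro p hp
  simp only [pqInit, List.mem_cons, List.not_mem_nil, or_false] at hp
  rcases hp with rfl | rfl | rfl | rfl | rfl <;>
    exact ⟨by decide, by decide, by decide, by decide⟩

lemma solve_eq_countP (l r : Int) : solve l r = (candN.countP (Pb l r) : Int) := by
  have h := loop_inv l r 1000000 pqInit 0 pqInit_ok totalLenN_init_le
  show solveLoop l r 1000000 [1, 2, 3, 4, 5] 0 = _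
  rw [show ([1, 2, 3, 4, 5] : List Int) = pqInit.map Prod.snd from rfl, h]
  norm_num [candN]

-- ---- B reduces to a count over candB ----

lemma innerB' (l r : Int) (ps : List (List Int)) : ∀ (c : Int),
    ps.foldl (fun count p =>
      if PySem.List.pyGetD p 0 0 = 0 then count
      else if l ≤ valB p ∧ valB p ≤ r then count + 1 else count) c
    = c + (((ps.filter (fun p => !decide (PySem.List.pyGetD p 0 0 = 0))).map valB).countP
        (Pb l r) : Int) := by
  induction ps with
  | nil => intro c; simp
  | cons p ps ih =>
    intro c
    by_cases h0 : PySem.List.pyGetD p 0 0 = 0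
    · simp [List.foldl_cons, h0, ih, List.filter_cons]
    · have hfil : (p :: ps).filter (fun q => !decide (PySem.List.pyGetD q 0 0 = 0))
          = p :: ps.filter (fun q => !decide (PySem.List.pyGetD q 0 0 = 0)) := by
        simp [List.filter_cons, h0]
      by_cases hP : l ≤ valB p ∧ valB p ≤ r
      · have hb : Pb l r (valB p) = true := by simp only [Pb, decide_eq_true_eq]; exact hP
        rw [List.foldl_cons, if_neg h0, if_pos hP, ih, hfil, List.map_cons,
          List.countP_cons, hb]
        simp only [if_true]
        push_cast
        ring
      · have hb : Pb l r (valB p) = false := by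
          simp only [Pb, decide_eq_false_iff_not]; exact hP
        rw [List.foldl_cons, if_neg h0, if_neg hP, ih, hfil, List.map_cons,
          List.countP_cons, hb]
        simp only [Bool.false_eq_true, if_false]
        push_cast
        ring

lemma innerB (l r : Int) (ps : List (List Int)) : ∀ (c : Int),
    ps.foldl (fun count p =>
      if PySem.List.pyGetD p 0 0 = 0 then count
      else
        let v := p.foldl (fun v d => v * 10 + d) 0
        if l ≤ v ∧ v ≤ r then count + 1 else count) c
    = c + (((ps.filter (fun p => !decide (PySem.List.pyGetD p 0 0 = 0))).map valB).countP
        (Pb l r) : Int) :=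
  innerB' l r ps

lemma solve_alt_eq_countP (l r : Int) : solve_alt l r = (candB.countP (Pb l r) : Int) := by
  rw [solve_alt, show PySem.List.pyRange 1 7 1 = ([1, 2, 3, 4, 5, 6] : List Int) from by decide]
  simp only [List.foldl_cons, List.foldl_nil]
  rw [innerB, innerB, innerB, innerB, innerB, innerB]
  simp only [show ((1:Int)).toNat = 1 from rfl, show ((2:Int)).toNat = 2 from rfl,
    show ((3:Int)).toNat = 3 from rfl, show ((4:Int)).toNat = 4 from rfl,
    show ((5:Int)).toNat = 5 from rfl, show ((6:Int)).toNat = 6 from rfl]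
  simp only [candB, lvlB, List.countP_append]
  push_cast
  ring

-- ---- the two candidate lists agree as multisets ----

lemma mergeF_perm : ∀ (f : Nat) (xs ys : List Int), (mergeF f xs ys).Perm (xs ++ ys) := by
  intro f
  induction f with
  | zero => intro xs ys; simp [mergeF]
  | succ f ih =>
    intro xs ys
    match xs, ys with
    | [], ys => simp [mergeF]
    | x :: xs, [] => simp [mergeF]
    | x :: xs, y :: ys =>
      rw [mergeF]
      by_cases h : x ≤ y
      · rw [if_pos h]
        exact (ih xs (y :: ys)).cons x
      · rw [if_neg h]
        exact ((ih (x :: xs) ys).cons y).trans List.perm_middle.symm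

lemma pairUp_perm : ∀ (ls : List (List Int)), (pairUp ls).flatten.Perm ls.flatten := by
  intro ls
  induction ls using pairUp.induct with
  | case1 => simp [pairUp]
  | case2 a => simp [pairUp]
  | case3 a b rest ih =>
    rw [pairUp]
    simp only [List.flatten_cons]
    exact ((mergeF_perm 4000 a b).append ih).trans (by rw [List.append_assoc])

lemma msortRounds_perm : ∀ (f : Nat) (ls : List (List Int)),
    (msortRounds f ls).Perm ls.flatten := by
  intro f
  induction f with
  | zero => intro ls; simp [msortRounds]
  | succ f ih =>
    intro ls
    rw [msortRounds]
    by_cases h : ls.length ≤ 1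
    · rw [if_pos h]
    · rw [if_neg h]
      exact (ih (pairUp ls)).trans (pairUp_perm ls)

lemma flatten_map_singleton : ∀ (l : List Int), (l.map (fun x => [x])).flatten = l := by
  intro l
  induction l with
  | nil => rfl
  | cons x l ih => simp [ih]

lemma msort_perm (l : List Int) : (msort l).Perm l := by
  rw [msort]
  exact (msortRounds_perm 20 _).trans (by rw [flatten_map_singleton])

set_option maxRecDepth 3000000 in
set_option maxHeartbeats 16000000 in
lemma cand_sort_eq : msort candN = msort candB := by decide

lemma cand_perm : candN.Perm candB := by
  have h1 := msort_perm candN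
  rw [cand_sort_eq] at h1
  exact h1.symm.trans (msort_perm candB)

-- ===== VERDICT (by name: the statement is the Claim_ definition above) =====
theorem solve_spec : Claim_equal_solve := by
  intro l r _
  unfold Spec_solve
  rw [solve_eq_countP, solve_alt_eq_countP, cand_perm.countP_eq]
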